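-- pv_equiv track=rewrite | github.com/jwansek/SubredditModActionsLog | modLogStream.py | convert_weeklyactions
-- ===== SOURCE A (Python) =====
-- from collections import Counter
--
-- def convert_weeklyactions(weeklyactions):
--     mods = []
--     approvelink = []
--     removelink = []
--     removecomment = []
--     misc = []
--     for mod, actions in weeklyactions.items():
--         counter = dict(Counter(actions))
--         mods.append(mod)
--         nonmisc = 0
--         if "approvelink" in counter.keys():
--             approvelink.append(counter["approvelink"])
--             nonmisc += counter["approvelink"]
--         else:
--             approvelink.append(0)
--         if "removelink" in counter.keys():
--             removelink.append(counter["removelink"])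
--             nonmisc += counter["removelink"]
--         else:
--             removelink.append(0)
--         if "removecomment" in counter.keys():
--             removecomment.append(counter["removecomment"])
--             nonmisc += counter["removecomment"]
--         else:
--             removecomment.append(0)
--         misc.append(len(actions) - nonmisc)
--     return mods, approvelink, removelink, removecomment, misc
-- ===== SOURCE B (Python) =====
-- def convert_weeklyactions(weeklyactions):
--     mods = []
--     approvelink = []
--     removelink = []
--     removecomment = []
--     misc = []
--     for mod, actions in weeklyactions.items():
--         a = rl = rc = m = 0
--         for act in actions:
--             if act == "approvelink":
--                 a += 1
--             elif act == "removelink":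
--                 rl += 1
--             elif act == "removecomment":
--                 rc += 1
--             else:
--                 m += 1
--         mods.append(mod)
--         approvelink.append(a)
--         removelink.append(rl)
--         removecomment.append(rc)
--         misc.append(m)
--     return mods, approvelink, removelink, removecomment, misc
-- ===== Notes on version B (the rewrite author's own statement) =====
-- stated objective: simpler
-- what changed: Replaces building a full Counter frequency table per mod and then probing three keys (membership tests, misc by len-subtraction) with a single direct-classification pass keeping four scalar counters, misc counted directly.
import Mathlib
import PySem

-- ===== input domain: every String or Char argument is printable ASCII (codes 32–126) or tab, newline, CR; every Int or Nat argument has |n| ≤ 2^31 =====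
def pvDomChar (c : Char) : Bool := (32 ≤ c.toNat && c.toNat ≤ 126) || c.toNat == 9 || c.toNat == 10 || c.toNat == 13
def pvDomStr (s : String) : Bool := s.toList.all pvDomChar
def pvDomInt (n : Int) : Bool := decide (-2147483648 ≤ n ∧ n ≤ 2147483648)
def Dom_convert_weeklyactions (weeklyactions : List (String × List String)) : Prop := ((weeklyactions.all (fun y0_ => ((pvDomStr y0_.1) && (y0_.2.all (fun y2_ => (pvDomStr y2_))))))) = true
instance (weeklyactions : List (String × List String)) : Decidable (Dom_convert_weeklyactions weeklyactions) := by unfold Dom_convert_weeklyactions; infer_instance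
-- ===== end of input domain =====

-- B replaces the per-mod Counter table (built, then probed for three keys, misc by subtraction)
-- with one direct-classification pass over the actions keeping four scalar counters: simpler.

-- ===== PORT A =====
-- one iteration of A's loop body: build Counter(actions), probe three keys, misc = len - nonmisc
def pvStepA (st : List String × List Int × List Int × List Int × List Int)
    (p : String × List String) : List String × List Int × List Int × List Int × List Int :=
  let counter := PySem.Dict.counter p.2
  let mods := st.1 ++ [p.1]
  let r1 := if counter.contains "approvelink" then
      (st.2.1 ++ [counter.getD "approvelink" 0], counter.getD "approvelink" 0)
    else (st.2.1 ++ [(0 : Int)], (0 : Int))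
  let r2 := if counter.contains "removelink" then
      (st.2.2.1 ++ [counter.getD "removelink" 0], r1.2 + counter.getD "removelink" 0)
    else (st.2.2.1 ++ [(0 : Int)], r1.2)
  let r3 := if counter.contains "removecomment" then
      (st.2.2.2.1 ++ [counter.getD "removecomment" 0], r2.2 + counter.getD "removecomment" 0)
    else (st.2.2.2.1 ++ [(0 : Int)], r2.2)
  (mods, r1.1, r2.1, r3.1, st.2.2.2.2 ++ [(p.2.length : Int) - r3.2])

def convert_weeklyactions (weeklyactions : List (String × List String)) :
    List String × List Int × List Int × List Int × List Int :=
  weeklyactions.foldl pvStepA ([], [], [], [], [])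

-- ===== PORT B =====
-- B's inner loop: classify each action into one of four scalar counters
def pvClassify (c : Int × Int × Int × Int) (act : String) : Int × Int × Int × Int :=
  if act = "approvelink" then (c.1 + 1, c.2.1, c.2.2.1, c.2.2.2)
  else if act = "removelink" then (c.1, c.2.1 + 1, c.2.2.1, c.2.2.2)
  else if act = "removecomment" then (c.1, c.2.1, c.2.2.1 + 1, c.2.2.2)
  else (c.1, c.2.1, c.2.2.1, c.2.2.2 + 1)

def pvStepB (st : List String × List Int × List Int × List Int × List Int)
    (p : String × List String) : List String × List Int × List Int × List Int × List Int :=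
  let c := p.2.foldl pvClassify (0, 0, 0, 0)
  (st.1 ++ [p.1], st.2.1 ++ [c.1], st.2.2.1 ++ [c.2.1], st.2.2.2.1 ++ [c.2.2.1],
   st.2.2.2.2 ++ [c.2.2.2])

def convert_weeklyactions_alt (weeklyactions : List (String × List String)) :
    List String × List Int × List Int × List Int × List Int :=
  weeklyactions.foldl pvStepB ([], [], [], [], [])

-- ===== PRECONDITION & SPEC =====
def Spec_convert_weeklyactions (weeklyactions : List (String × List String)) (out : List String × List Int × List Int × List Int × List Int) : Prop := out = convert_weeklyactions_alt weeklyactions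
instance (weeklyactions : List (String × List String)) (out : List String × List Int × List Int × List Int × List Int) : Decidable (Spec_convert_weeklyactions weeklyactions out) := by unfold Spec_convert_weeklyactions; infer_instance

-- ===== CLAIM (what is proved, stated in full; the proofs are below) =====
def Claim_equal_convert_weeklyactions : Prop := ∀ (weeklyactions : List (String × List String)), Dom_convert_weeklyactions weeklyactions → Spec_convert_weeklyactions weeklyactions (convert_weeklyactions weeklyactions)

-- ===== LEMMAS AND PROOFS =====

-- B's inner fold computes the three counts and misc = length - their sum
theorem pvClassify_fold (actions : List String) (a r c m : Int) :
    actions.foldl pvClassify (a, r, c, m) =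
      (a + actions.count "approvelink", r + actions.count "removelink",
       c + actions.count "removecomment",
       m + ((actions.length : Int) - actions.count "approvelink"
            - actions.count "removelink" - actions.count "removecomment")) := by
  induction actions generalizing a r c m with
  | nil => simp
  | cons x xs ih =>
    simp only [List.foldl_cons, pvClassify, List.count_cons, List.length_cons]
    split_ifs with h1 h2 h3 <;>
      rw [ih] <;> simp [Prod.ext_iff, *] <;> first | omega | simp_all

-- A's probe-and-append of one key equals appending the plain count (with nonmisc accumulation)
theorem pvBranch (actions : List String) (k : String) (xs : List Int) (acc : Int) :
    (if (PySem.Dict.counter actions).contains k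
      then (xs ++ [(PySem.Dict.counter actions).getD k 0],
            acc + (PySem.Dict.counter actions).getD k 0)
      else (xs ++ [(0 : Int)], acc)) =
      (xs ++ [(actions.count k : Int)], acc + actions.count k) := by
  by_cases h : k ∈ actions
  · simp [PySem.Dict.contains_counter, h, PySem.Dict.getD_counter]
  · simp [PySem.Dict.contains_counter, h, List.count_eq_zero_of_not_mem h]

-- the same for A's first probe, whose nonmisc starts at the probed value
theorem pvBranch1 (actions : List String) (xs : List Int) :
    (if (PySem.Dict.counter actions).contains "approvelink"
      then (xs ++ [(PySem.Dict.counter actions).getD "approvelink" 0],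
            (PySem.Dict.counter actions).getD "approvelink" 0)
      else (xs ++ [(0 : Int)], (0 : Int))) =
      (xs ++ [(actions.count "approvelink" : Int)],
       (actions.count "approvelink" : Int)) := by
  by_cases h : "approvelink" ∈ actions
  · simp [PySem.Dict.contains_counter, h, PySem.Dict.getD_counter]
  · simp [PySem.Dict.contains_counter, h, List.count_eq_zero_of_not_mem h]

-- the two loop bodies agree, so the folds agree
theorem pvStep_eq : pvStepA = pvStepB := by
  funext st p
  simp only [pvStepA, pvStepB, pvClassify_fold, pvBranch1, pvBranch]
  simp [Prod.ext_iff]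
  ring

-- ===== VERDICT (by name: the statement is the Claim_ definition above) =====
theorem convert_weeklyactions_spec : Claim_equal_convert_weeklyactions := by
  intro w _
  unfold Spec_convert_weeklyactions convert_weeklyactions convert_weeklyactions_alt
  rw [pvStep_eq]
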